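-- pv_equiv track=rewrite | github.com/raghav-kukreti/CSE101_Assignments | kmap/main.py | reduce_minterms
-- ===== SOURCE A (Python) =====
-- def find_diff(term_one, term_two):
-- 	# Check if they differ by one bit
-- 	flag = 0
-- 	for i in range(len(term_one)):
-- 		if(term_one[i]!=term_two[i]):
-- 			flag+=1
--
-- 	return (flag==1)
--
-- def replace_complements(item_1, item_2):
-- 	temp = ""
-- 	for i in range(len(item_1)):
-- 		if(item_1[i] != item_2[i]):
-- 			temp = temp+"-"
-- 		else:
-- 			temp=temp+item_1[i]
-- 	return temp
--
-- def in_vector(arr, item):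
-- 	ch=0
-- 	for i in arr:
-- 		if (item == i):
-- 			return True
-- 			ch+=1
-- 			break
--
-- 	if(ch==0):
-- 		return False
--
-- def reduce_minterms(minterms):
-- 	new_minterms = []
-- 	max_val = len(minterms)
-- 	checked = [None]*max_val
--
-- 	for i in range(max_val):
-- 		for j in range(i, max_val):
-- 			if(find_diff(minterms[i], minterms[j])):
-- 				checked[i]=1
-- 				checked[j]=1
-- 				if(not in_vector(new_minterms,replace_complements(minterms[i],minterms[j]))):
-- 					new_minterms.append(replace_complements(minterms[i],minterms[j]))
--
-- 	for i in range(max_val):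
-- 		if(checked[i]!=1 and not in_vector(new_minterms,minterms[i])):
-- 			new_minterms.append(minterms[i])
--
-- 	return new_minterms
-- ===== SOURCE B (Python) =====
-- def cut(t, p):
--     return t[:p] + t[p+1:]
--
-- def reduce_minterms(minterms):
--     # Hash-bucket QM step: index every term under (position, term-with-that-position-removed),
--     # grouped inside each bucket by the character at that position; two terms combine iff they
--     # share a bucket under different group characters.  Width is validated up front.
--     n = len(minterms)
--     width = len(minterms[0]) if minterms else 0
--     for t in minterms:
--         if len(t) != width:
--             raise IndexError("minterms must all have the same width")
--     buckets = {}
--     for idx, t in enumerate(minterms):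
--         for p in range(width):
--             buckets.setdefault((p, cut(t, p)), {}).setdefault(t[p], []).append(idx)
--     new_minterms = []
--     checked = [False] * n
--     for i in range(n):
--         t = minterms[i]
--         partner = {}
--         for p in range(width):
--             for c, idxs in buckets.get((p, cut(t, p)), {}).items():
--                 if c != t[p]:
--                     for j in idxs:
--                         if j > i:
--                             partner[j] = p
--         for j in sorted(partner):
--             p = partner[j]
--             checked[i] = True
--             checked[j] = True
--             comb = t[:p] + "-" + t[p+1:]
--             if comb not in new_minterms:
--                 new_minterms.append(comb)
--     for i in range(n):
--         if not checked[i] and minterms[i] not in new_minterms: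
--             new_minterms.append(minterms[i])
--     return new_minterms
-- ===== Notes on version B (the rewrite author's own statement) =====
-- stated objective: faster
-- what changed: Replaces A's all-pairs O(n^2*L) scan with a hash index: every term is bucketed once under (position, term-with-that-position-deleted) and grouped by the character at that position, so each term's one-difference partners are found by dictionary probes instead of scanning all later terms; B validates up front that all minterms share one width and raises IndexError otherwise, where A either raises IndexError itself or returns a prefix-truncation artefact.
-- outside the precondition, e.g. on reduce_minterms(['0', '11']): A returns ['-'], B raises IndexError
import Mathlib
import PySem

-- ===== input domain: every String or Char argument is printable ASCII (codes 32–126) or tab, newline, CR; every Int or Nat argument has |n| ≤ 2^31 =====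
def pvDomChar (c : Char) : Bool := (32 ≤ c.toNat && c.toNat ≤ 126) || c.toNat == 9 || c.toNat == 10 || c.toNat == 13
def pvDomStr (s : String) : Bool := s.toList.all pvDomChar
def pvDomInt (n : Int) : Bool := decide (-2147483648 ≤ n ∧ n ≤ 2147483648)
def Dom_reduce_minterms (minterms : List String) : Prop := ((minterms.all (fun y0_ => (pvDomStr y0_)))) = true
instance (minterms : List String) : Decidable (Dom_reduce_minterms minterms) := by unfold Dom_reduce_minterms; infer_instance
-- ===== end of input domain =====

-- B replaces A's all-pairs scan with a hash index over (position, term-with-position-deleted) buckets (faster, asymptotic);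
-- Pre_ restricts to equal-length terms: elsewhere A either raises IndexError or compares/truncates by prefix, an artefact.


-- ===== PORT A =====
-- pyGetD is exact here for in-range indices; inputs where Python's indexing raises are outside Pre_.
def find_diff (t1 t2 : String) : Bool :=
  let flag : Int := (PySem.List.pyRange 0 (PySem.List.len t1.toList) 1).foldl
    (fun flag i => if PySem.List.pyGetD t1.toList i ' ' ≠ PySem.List.pyGetD t2.toList i ' ' then flag + 1 else flag) 0
  flag == 1

def replace_complements (i1 i2 : String) : String :=
  String.ofList ((PySem.List.pyRange 0 (PySem.List.len i1.toList) 1).foldl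
    (fun temp i => if PySem.List.pyGetD i1.toList i ' ' ≠ PySem.List.pyGetD i2.toList i ' '
      then temp ++ ['-'] else temp ++ [PySem.List.pyGetD i1.toList i ' ']) [])

-- the loop returns True on the first hit; the dead 'ch' bookkeeping always falls through to False
def in_vector (arr : List String) (item : String) : Bool :=
  match arr with
  | [] => false
  | x :: rest => if item == x then true else in_vector rest item

def reduce_minterms (minterms : List String) : List String :=
  let max_val : Int := PySem.List.len minterms
  let st := (PySem.List.pyRange 0 max_val 1).foldl (fun (st : List String × List (Option Int)) i =>
    (PySem.List.pyRange i max_val 1).foldl (fun st j =>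
      if find_diff (PySem.List.pyGetD minterms i "") (PySem.List.pyGetD minterms j "") then
        let checked := PySem.List.pySetD (PySem.List.pySetD st.2 i (some 1)) j (some 1)
        if in_vector st.1 (replace_complements (PySem.List.pyGetD minterms i "") (PySem.List.pyGetD minterms j "")) = false then
          (st.1 ++ [replace_complements (PySem.List.pyGetD minterms i "") (PySem.List.pyGetD minterms j "")], checked)
        else (st.1, checked)
      else st) st) ([], List.replicate minterms.length none)
  (PySem.List.pyRange 0 max_val 1).foldl (fun new i =>
    if PySem.List.pyGetD st.2 i none ≠ some 1 ∧ in_vector new (PySem.List.pyGetD minterms i "") = false then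
      new ++ [PySem.List.pyGetD minterms i ""] else new) st.1

-- ===== PORT B =====
-- Source B's up-front width validation raises IndexError on mixed-width input; those inputs are outside
-- Pre_, so the port omits the raise, and ranges over each term's own length (= the shared width inside Pre_).
def cutS (t : String) (p : Int) : String :=
  String.ofList (PySem.List.slice t.toList none (some p) ++ PySem.List.slice t.toList (some (p+1)) none)

def buildBuckets (minterms : List String) : PySem.Dict (Int × String) (PySem.Dict Char (List Int)) :=
  (PySem.List.enumerate minterms).foldl (fun d it =>
    (PySem.List.pyRange 0 (PySem.List.len it.2.toList) 1).foldl (fun d p =>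
      d.insert (p, cutS it.2 p)
        ((d.getD (p, cutS it.2 p) PySem.Dict.empty).insert (PySem.List.pyGetD it.2.toList p ' ')
          ((d.getD (p, cutS it.2 p) PySem.Dict.empty).getD (PySem.List.pyGetD it.2.toList p ' ') [] ++ [it.1]))) d)
    PySem.Dict.empty

def reduce_minterms_alt (minterms : List String) : List String :=
  let n : Int := PySem.List.len minterms
  let buckets := buildBuckets minterms
  let st := (PySem.List.pyRange 0 n 1).foldl (fun (st : List String × List Bool) i =>
    let t := PySem.List.pyGetD minterms i ""
    let partner : PySem.Dict Int Int := (PySem.List.pyRange 0 (PySem.List.len t.toList) 1).foldl (fun pd p =>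
      ((buckets.getD (p, cutS t p) PySem.Dict.empty).items).foldl (fun pd ci =>
        if ci.1 ≠ PySem.List.pyGetD t.toList p ' ' then
          ci.2.foldl (fun pd j => if j > i then pd.insert j p else pd) pd
        else pd) pd) PySem.Dict.empty
    (PySem.List.sorted partner.keys (fun j => j) false).foldl (fun st j =>
      let p := partner.getD j 0
      let checked := PySem.List.pySetD (PySem.List.pySetD st.2 i true) j true
      let comb := String.ofList (PySem.List.slice t.toList none (some p) ++ '-' :: PySem.List.slice t.toList (some (p+1)) none)
      if st.1.contains comb then (st.1, checked) else (st.1 ++ [comb], checked)) st)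
    ([], List.replicate minterms.length false)
  (PySem.List.pyRange 0 n 1).foldl (fun new i =>
    if PySem.List.pyGetD st.2 i false = false ∧ new.contains (PySem.List.pyGetD minterms i "") = false then
      new ++ [PySem.List.pyGetD minterms i ""] else new) st.1

-- ===== PRECONDITION & SPEC =====
-- Pre_ excludes lists of unequal-length strings: there A either raises IndexError (a later string shorter)
-- or silently compares/truncates by the earlier string's length, an artefact of its prefix loop.
def Pre_reduce_minterms (minterms : List String) : Prop :=
  ∀ s ∈ minterms, ∀ u ∈ minterms, s.toList.length = u.toList.length
instance (minterms : List String) : Decidable (Pre_reduce_minterms minterms) := by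
  unfold Pre_reduce_minterms; infer_instance
def pvWitness_reduce_minterms : List String := ["00", "01", "11"]

def Spec_reduce_minterms (minterms : List String) (out : List String) : Prop := out = reduce_minterms_alt minterms
instance (minterms : List String) (out : List String) : Decidable (Spec_reduce_minterms minterms out) := by unfold Spec_reduce_minterms; infer_instance

-- ===== CLAIM (what is proved, stated in full; the proofs are below) =====
def Claim_equal_reduce_minterms : Prop := ∀ (minterms : List String), Dom_reduce_minterms minterms → Pre_reduce_minterms minterms → Spec_reduce_minterms minterms (reduce_minterms minterms)

-- ===== LEMMAS AND PROOFS =====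

/-! Named forms of the two ports' loops (definitionally equal to the ports). -/

def aCore (m : List String) (i : Int) (st : List String × List (Option Int)) (j : Int) :
    List String × List (Option Int) :=
  let checked := PySem.List.pySetD (PySem.List.pySetD st.2 i (some 1)) j (some 1)
  if in_vector st.1 (replace_complements (PySem.List.pyGetD m i "") (PySem.List.pyGetD m j "")) = false then
    (st.1 ++ [replace_complements (PySem.List.pyGetD m i "") (PySem.List.pyGetD m j "")], checked)
  else (st.1, checked)

def aInner (m : List String) (i : Int) (st : List String × List (Option Int)) (j : Int) :
    List String × List (Option Int) :=
  if find_diff (PySem.List.pyGetD m i "") (PySem.List.pyGetD m j "") then aCore m i st j else st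

def aOuter (m : List String) (st : List String × List (Option Int)) (i : Int) :
    List String × List (Option Int) :=
  (PySem.List.pyRange i (PySem.List.len m) 1).foldl (aInner m i) st

def aPh1 (m : List String) : List String × List (Option Int) :=
  (PySem.List.pyRange 0 (PySem.List.len m) 1).foldl (aOuter m) ([], List.replicate m.length none)

def phase2A (m : List String) (st : List String × List (Option Int)) : List String :=
  (PySem.List.pyRange 0 (PySem.List.len m) 1).foldl (fun new i =>
    if PySem.List.pyGetD st.2 i none ≠ some 1 ∧ in_vector new (PySem.List.pyGetD m i "") = false then
      new ++ [PySem.List.pyGetD m i ""] else new) st.1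

lemma reduce_eq (m : List String) : reduce_minterms m = phase2A m (aPh1 m) := rfl

def bPartner (m : List String) (i : Int) : PySem.Dict Int Int :=
  (PySem.List.pyRange 0 (PySem.List.len (PySem.List.pyGetD m i "").toList) 1).foldl (fun pd p =>
    (((buildBuckets m).getD (p, cutS (PySem.List.pyGetD m i "") p) PySem.Dict.empty).items).foldl (fun pd ci =>
      if ci.1 ≠ PySem.List.pyGetD (PySem.List.pyGetD m i "").toList p ' ' then
        ci.2.foldl (fun pd j => if j > i then pd.insert j p else pd) pd
      else pd) pd) PySem.Dict.empty

def bInner (m : List String) (st : List String × List Bool) (i : Int) : List String × List Bool :=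
  (PySem.List.sorted (bPartner m i).keys (fun j => j) false).foldl (fun st j =>
    let p := (bPartner m i).getD j 0
    let checked := PySem.List.pySetD (PySem.List.pySetD st.2 i true) j true
    let comb := String.ofList (PySem.List.slice (PySem.List.pyGetD m i "").toList none (some p) ++ '-' :: PySem.List.slice (PySem.List.pyGetD m i "").toList (some (p+1)) none)
    if st.1.contains comb then (st.1, checked) else (st.1 ++ [comb], checked)) st

def bPh1 (m : List String) : List String × List Bool :=
  (PySem.List.pyRange 0 (PySem.List.len m) 1).foldl (bInner m) ([], List.replicate m.length false)

def phase2B (m : List String) (st : List String × List Bool) : List String :=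
  (PySem.List.pyRange 0 (PySem.List.len m) 1).foldl (fun new i =>
    if PySem.List.pyGetD st.2 i false = false ∧ new.contains (PySem.List.pyGetD m i "") = false then
      new ++ [PySem.List.pyGetD m i ""] else new) st.1

lemma alt_eq (m : List String) : reduce_minterms_alt m = phase2B m (bPh1 m) := rfl

/-! Generic helpers. -/

def pvConv (b : Bool) : Option Int := if b then some 1 else none

lemma pv_foldl_rel {α β γ : Type} (R : β → γ → Prop) (l : List α) (f : β → α → β) (g : γ → α → γ) :
    ∀ (b : β) (c : γ), R b c → (∀ x ∈ l, ∀ b c, R b c → R (f b x) (g c x)) → R (l.foldl f b) (l.foldl g c) := by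
  induction l with
  | nil => intro b c h _; exact h
  | cons x xs ih =>
    intro b c h hstep
    exact ih (f b x) (g c x) (hstep x (List.mem_cons_self) b c h)
      (fun y hy => hstep y (List.mem_cons_of_mem _ hy))

lemma in_vector_eq_contains (arr : List String) (x : String) : in_vector arr x = arr.contains x := by
  induction arr with
  | nil => rfl
  | cons a rest ih =>
    simp only [in_vector, List.contains_cons, ih]
    by_cases h : x = a
    · simp [h]
    · simp [h, beq_iff_eq]

lemma pv_nodup_all_eq_singleton {l : List Nat} {a : Nat} (hnd : l.Nodup) (ha : a ∈ l)
    (hall : ∀ b ∈ l, b = a) : l = [a] := by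
  cases l with
  | nil => cases ha
  | cons x xs =>
    have hx : x = a := hall x List.mem_cons_self
    subst hx
    have : xs = [] := by
      apply List.eq_nil_iff_forall_not_mem.mpr
      intro y hy
      have := hall y (List.mem_cons_of_mem _ hy)
      subst this
      exact (List.nodup_cons.mp hnd).1 hy
    simp [this]

lemma pv_countP_one_iff (L : Nat) (P : Nat → Prop) [DecidablePred P] :
    (List.range L).countP (fun k => decide (P k)) = 1 ↔
      ∃ p, p < L ∧ P p ∧ ∀ q, q < L → P q → q = p := by
  rw [List.countP_eq_length_filter]
  constructor
  · intro h
    obtain ⟨a, ha⟩ := List.length_eq_one_iff.mp h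
    have hmem : a ∈ (List.range L).filter (fun k => decide (P k)) := by
      rw [ha]; exact List.mem_singleton_self a
    have h2 := List.mem_filter.mp hmem
    refine ⟨a, List.mem_range.mp h2.1, of_decide_eq_true h2.2, ?_⟩
    intro q hq hPq
    have : q ∈ (List.range L).filter (fun k => decide (P k)) :=
      List.mem_filter.mpr ⟨List.mem_range.mpr hq, decide_eq_true hPq⟩
    rw [ha] at this
    simpa using this
  · rintro ⟨p, hpL, hPp, huniq⟩
    have hmem : p ∈ (List.range L).filter (fun k => decide (P k)) :=
      List.mem_filter.mpr ⟨List.mem_range.mpr hpL, decide_eq_true hPp⟩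
    have hall : ∀ b ∈ (List.range L).filter (fun k => decide (P k)), b = p := by
      intro b hb
      have h2 := List.mem_filter.mp hb
      exact huniq b (List.mem_range.mp h2.1) (of_decide_eq_true h2.2)
    rw [pv_nodup_all_eq_singleton ((List.nodup_range).filter _) hmem hall]
    rfl

/-! Characterisation of A's helpers. -/

def OneAt (as bs : List Char) (p : Nat) : Prop :=
  p < as.length ∧ ¬ (as.getD p ' ' = bs.getD p ' ') ∧
    ∀ q, q < as.length → q ≠ p → as.getD q ' ' = bs.getD q ' '

lemma oneAt_unique {as bs : List Char} {p p' : Nat} (h : OneAt as bs p) (h' : OneAt as bs p') : p = p' := by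
  by_contra hne
  exact h'.2.1 (h.2.2 p' h'.1 (fun he => hne he.symm))

lemma find_diff_countP (t1 t2 : String) :
    find_diff t1 t2 = true ↔
      (List.range t1.toList.length).countP
        (fun k => decide (t1.toList.getD k ' ' ≠ t2.toList.getD k ' ')) = 1 := by
  simp only [find_diff]
  rw [PySem.List.foldl_ite_add_one, PySem.List.pyRange_one, List.countP_map]
  have hL : (PySem.List.len t1.toList - 0).toNat = t1.toList.length := by
    simp [PySem.List.len_eq]
  rw [hL]
  have hpred : ((fun x => decide (PySem.List.pyGetD t1.toList x ' ' ≠ PySem.List.pyGetD t2.toList x ' ')) ∘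
        (fun k : Nat => (0 : Int) + (k : Int)))
      = fun k : Nat => decide (t1.toList.getD k ' ' ≠ t2.toList.getD k ' ') := by
    funext k
    simp [PySem.List.pyGetD_natCast]
  rw [hpred]
  simp only [beq_iff_eq]
  constructor <;> intro h <;> omega

lemma find_diff_iff (t1 t2 : String) :
    find_diff t1 t2 = true ↔ ∃ p, OneAt t1.toList t2.toList p := by
  rw [find_diff_countP, pv_countP_one_iff]
  constructor
  · rintro ⟨p, hpL, hPp, huniq⟩
    refine ⟨p, hpL, hPp, ?_⟩
    intro q hq hqp
    by_contra hne
    exact hqp (huniq q hq hne)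
  · rintro ⟨p, hpL, hPp, hagree⟩
    refine ⟨p, hpL, hPp, ?_⟩
    intro q hq hPq
    by_contra hne
    exact hPq (hagree q hq hne)

lemma find_diff_self (t : String) : find_diff t t = false := by
  rw [← Bool.not_eq_true, find_diff_iff]
  rintro ⟨p, _, hne, _⟩
  exact hne rfl

/-! cut and replace_complements. -/

def cutL (as : List Char) (p : Nat) : List Char := as.take p ++ as.drop (p+1)

lemma cutS_natCast (t : String) (p : Nat) : cutS t (p : Int) = String.ofList (cutL t.toList p) := by
  have h1 : ((p : Int) + 1) = ((p + 1 : Nat) : Int) := by push_cast; ring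
  rw [cutS, h1, PySem.List.slice_to_natCast, PySem.List.slice_from_natCast, cutL]

lemma pv_ofList_inj {as bs : List Char} (h : String.ofList as = String.ofList bs) : as = bs := by
  have := congrArg String.toList h
  simpa using this

lemma cutL_eq_iff (as bs : List Char) (h : as.length = bs.length) (p : Nat) (hp : p < as.length) :
    cutL as p = cutL bs p ↔ ∀ q, q < as.length → q ≠ p → as.getD q ' ' = bs.getD q ' ' := by
  unfold cutL
  constructor
  · intro he q hq hne
    have hlen : (as.take p).length = (bs.take p).length := by
      simp [List.length_take]; omega
    obtain ⟨htake, hdrop⟩ := List.append_inj he (by simpa using hlen)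
    rcases Nat.lt_or_ge q p with hlt | hge
    · have := congrArg (fun l => l.getD q ' ') htake
      simpa [List.getD_eq_getElem?_getD, List.getElem?_take, hlt] using this
    · have hgt : p < q := lt_of_le_of_ne hge (fun he2 => hne he2.symm)
      have := congrArg (fun l => l.getD (q - (p+1)) ' ') hdrop
      simp only [List.getD_eq_getElem?_getD, List.getElem?_drop] at this
      have harith : p + 1 + (q - (p + 1)) = q := by omega
      rwa [harith] at this
  · intro hq
    have h1 : as.take p = bs.take p := by
      apply List.ext_getElem (by simp [List.length_take, h])
      intro k h1 h2
      rw [List.length_take] at h1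
      have hkp : k < p := (lt_min_iff.mp h1).1
      have hkL : k < as.length := (lt_min_iff.mp h1).2
      simp only [List.getElem_take]
      have h3 := hq k hkL (by omega)
      rwa [List.getD_eq_getElem _ _ hkL, List.getD_eq_getElem _ _ (h ▸ hkL)] at h3
    have h2 : as.drop (p+1) = bs.drop (p+1) := by
      apply List.ext_getElem (by simp [h])
      intro k h1 h2
      rw [List.length_drop] at h1
      simp only [List.getElem_drop]
      have hkL : p + 1 + k < as.length := by omega
      have h3 := hq (p+1+k) hkL (by omega)
      rwa [List.getD_eq_getElem _ _ hkL, List.getD_eq_getElem _ _ (h ▸ hkL)] at h3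
    rw [h1, h2]

lemma pv_map_range_update (as : List Char) (p : Nat) (hp : p < as.length) (f : Nat → Char)
    (hf : ∀ k, k < as.length → f k = if k = p then '-' else as.getD k ' ') :
    (List.range as.length).map f = as.take p ++ '-' :: as.drop (p+1) := by
  have hlen : (as.take p).length = p := by rw [List.length_take]; omega
  apply List.ext_getElem?
  intro k
  rw [List.getElem?_map]
  by_cases hkL : k < as.length
  · rw [List.getElem?_range hkL]
    simp only [Option.map_some]
    rw [hf k hkL]
    rcases Nat.lt_trichotomy k p with hlt | heq | hgt
    · rw [List.getElem?_append_left (by omega), List.getElem?_take, if_pos hlt]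
      rw [List.getElem?_eq_getElem hkL, if_neg (by omega), List.getD_eq_getElem _ _ hkL]
    · subst heq
      rw [List.getElem?_append_right (by omega), hlen, Nat.sub_self]
      simp
    · rw [List.getElem?_append_right (by omega), hlen]
      have h5 : k - p = (k - p - 1) + 1 := by omega
      rw [h5, List.getElem?_cons_succ, List.getElem?_drop]
      have h6 : p + 1 + (k - p - 1) = k := by omega
      rw [h6, List.getElem?_eq_getElem hkL, if_neg (by omega), List.getD_eq_getElem _ _ hkL]
  · rw [List.getElem?_eq_none (by simpa using Nat.le_of_not_lt hkL)]
    rw [List.getElem?_eq_none (by simp [hlen]; omega)]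
    rfl

lemma replace_complements_eq (t1 t2 : String) (p : Nat) (h : OneAt t1.toList t2.toList p) :
    replace_complements t1 t2 = String.ofList (t1.toList.take p ++ '-' :: t1.toList.drop (p+1)) := by
  simp only [replace_complements]
  congr 1
  have hb : ∀ (acc : List Char), ∀ i ∈ PySem.List.pyRange 0 (PySem.List.len t1.toList) 1,
      (if PySem.List.pyGetD t1.toList i ' ' ≠ PySem.List.pyGetD t2.toList i ' '
        then acc ++ ['-'] else acc ++ [PySem.List.pyGetD t1.toList i ' '])
      = acc ++ [if i = (p : Int) then '-' else PySem.List.pyGetD t1.toList i ' '] := by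
    intro acc i hi
    rw [PySem.List.mem_pyRange_one] at hi
    obtain ⟨k, rfl⟩ : ∃ k : Nat, i = (k : Int) := ⟨i.toNat, by omega⟩
    have hkL : k < t1.toList.length := by
      have := hi.2
      rw [PySem.List.len_eq] at this
      exact_mod_cast this
    rw [PySem.List.pyGetD_natCast, PySem.List.pyGetD_natCast]
    by_cases hkp : k = p
    · subst hkp
      rw [if_pos h.2.1, if_pos rfl]
    · have hag := h.2.2 k hkL hkp
      rw [if_neg (fun hne => hne hag),
          if_neg (fun hx : (k : Int) = (p : Int) => hkp (by exact_mod_cast hx))]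
  rw [PySem.List.foldl_congr_mem _ _ _ _ hb, PySem.List.foldl_append_singleton_eq_map]
  rw [PySem.List.pyRange_one, List.map_map]
  have hL : (PySem.List.len t1.toList - 0).toNat = t1.toList.length := by
    simp [PySem.List.len_eq]
  rw [hL, List.nil_append]
  apply pv_map_range_update t1.toList p h.1
  intro k hk
  simp only [Function.comp_apply, zero_add, PySem.List.pyGetD_natCast]
  by_cases hkp : k = p
  · simp [hkp]
  · simp [hkp, Nat.cast_inj]

/-! Buckets. -/

lemma pv_foldl_pres {α β : Type} (P : β → Prop) (l : List α) (f : β → α → β) :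
    ∀ b, P b → (∀ x ∈ l, ∀ b, P b → P (f b x)) → P (l.foldl f b) := by
  induction l with
  | nil => intro b h _; exact h
  | cons x xs ih =>
    intro b h hstep
    exact ih (f b x) (hstep x List.mem_cons_self b h) (fun y hy => hstep y (List.mem_cons_of_mem _ hy))

lemma pv_foldl_flatMap {α β γ : Type} (l : List α) (f : α → List β) (g : γ → β → γ) :
    ∀ b, (l.flatMap f).foldl g b = l.foldl (fun b a => (f a).foldl g b) b := by
  induction l with
  | nil => intro b; rfl
  | cons x xs ih =>
    intro b
    simp only [List.flatMap_cons, List.foldl_append, List.foldl_cons]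
    exact ih _

lemma bucket_inner (t : String) (idx p : Int) (key : String) (c : Char) :
    ∀ (ps : List Int), ps.Nodup → ∀ (d : PySem.Dict (Int × String) (PySem.Dict Char (List Int))),
    (((ps.foldl (fun d p' =>
        d.insert (p', cutS t p')
          ((d.getD (p', cutS t p') PySem.Dict.empty).insert (PySem.List.pyGetD t.toList p' ' ')
            ((d.getD (p', cutS t p') PySem.Dict.empty).getD (PySem.List.pyGetD t.toList p' ' ') [] ++ [idx]))) d).getD
        (p, key) PySem.Dict.empty).getD c [])
    = if p ∈ ps ∧ key = cutS t p ∧ c = PySem.List.pyGetD t.toList p ' '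
      then ((d.getD (p, key) PySem.Dict.empty).getD c []) ++ [idx]
      else (d.getD (p, key) PySem.Dict.empty).getD c [] := by
  intro ps
  induction ps with
  | nil => intro _ d; simp
  | cons p' rest ih =>
    intro hnd d
    obtain ⟨hp'nr, hndr⟩ := List.nodup_cons.mp hnd
    simp only [List.foldl_cons]
    rw [ih hndr]
    have hins : ∀ (c2 : Char),
        (((d.insert (p', cutS t p')
            ((d.getD (p', cutS t p') PySem.Dict.empty).insert (PySem.List.pyGetD t.toList p' ' ')
              ((d.getD (p', cutS t p') PySem.Dict.empty).getD (PySem.List.pyGetD t.toList p' ' ') [] ++ [idx]))).getD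
            (p, key) PySem.Dict.empty).getD c2 [])
        = if p = p' ∧ key = cutS t p' ∧ c2 = PySem.List.pyGetD t.toList p' ' '
          then ((d.getD (p, key) PySem.Dict.empty).getD c2 []) ++ [idx]
          else (d.getD (p, key) PySem.Dict.empty).getD c2 [] := by
      intro c2
      rw [PySem.Dict.getD_insert]
      by_cases hpk : (p, key) = (p', cutS t p')
      · obtain ⟨hp, hk⟩ := Prod.mk.injEq .. ▸ hpk
        rw [if_pos hpk, PySem.Dict.getD_insert]
        by_cases hc2 : c2 = PySem.List.pyGetD t.toList p' ' '
        · rw [if_pos hc2, if_pos ⟨hp, hk, hc2⟩, hp, hk, hc2]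
        · rw [if_neg hc2, if_neg (fun h => hc2 h.2.2), hp, hk]
      · rw [if_neg hpk, if_neg (fun h => hpk (by rw [h.1, h.2.1]))]
    rw [hins c]
    by_cases hA : p ∈ rest ∧ key = cutS t p ∧ c = PySem.List.pyGetD t.toList p ' '
    · have hppne : p ≠ p' := fun he => hp'nr (he ▸ hA.1)
      rw [if_pos hA, if_neg (fun h => hppne h.1),
        if_pos ⟨List.mem_cons_of_mem _ hA.1, hA.2.1, hA.2.2⟩]
    · rw [if_neg hA]
      by_cases hB : p = p' ∧ key = cutS t p' ∧ c = PySem.List.pyGetD t.toList p' ' '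
      · have hC : p ∈ p' :: rest ∧ key = cutS t p ∧ c = PySem.List.pyGetD t.toList p ' ' :=
          ⟨by rw [hB.1]; exact List.mem_cons_self, by rw [hB.1]; exact hB.2.1,
            by rw [hB.1]; exact hB.2.2⟩
        rw [if_pos hB, if_pos hC]
      · have hC : ¬(p ∈ p' :: rest ∧ key = cutS t p ∧ c = PySem.List.pyGetD t.toList p ' ') := by
          rintro ⟨h1, h2, h3⟩
          rcases List.mem_cons.mp h1 with he | hm
          · exact hB ⟨he, by rw [← he]; exact h2, by rw [← he]; exact h3⟩
          · exact hA ⟨hm, h2, h3⟩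
        rw [if_neg hB, if_neg hC]

lemma pv_mem_enumerate {α : Type} (l : List α) :
    ∀ (s x : Int) (t : α), (x, t) ∈ PySem.List.enumerate l s ↔
      ∃ k : Nat, k < l.length ∧ x = s + k ∧ l[k]? = some t := by
  induction l with
  | nil => intro s x t; simp [PySem.List.enumerate_nil]
  | cons a rest ih =>
    intro s x t
    rw [PySem.List.enumerate_cons]
    simp only [List.mem_cons, ih]
    constructor
    · rintro (he | ⟨k, hk, hx, hget⟩)
      · exact ⟨0, by simp, by simpa using congrArg Prod.fst he, by simpa using (congrArg Prod.snd he).symm⟩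
      · exact ⟨k + 1, by simpa using hk, by push_cast at hx ⊢; omega, by simpa using hget⟩
    · rintro ⟨k, hk, hx, hget⟩
      cases k with
      | zero =>
        left
        simp only [List.getElem?_cons_zero, Option.some.injEq] at hget
        simp [hx, hget]
      | succ k' =>
        right
        exact ⟨k', by simpa using hk, by push_cast at hx ⊢; omega, by simpa using hget⟩

lemma bucket_build (p : Int) (key : String) (c : Char) :
    ∀ (l : List String) (s : Int) (d : PySem.Dict (Int × String) (PySem.Dict Char (List Int))),
    ((((PySem.List.enumerate l s).foldl (fun d it =>
      (PySem.List.pyRange 0 (PySem.List.len it.2.toList) 1).foldl (fun d p' =>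
        d.insert (p', cutS it.2 p')
          ((d.getD (p', cutS it.2 p') PySem.Dict.empty).insert (PySem.List.pyGetD it.2.toList p' ' ')
            ((d.getD (p', cutS it.2 p') PySem.Dict.empty).getD (PySem.List.pyGetD it.2.toList p' ' ') [] ++ [it.1]))) d) d).getD
        (p, key) PySem.Dict.empty).getD c [])
    = ((d.getD (p, key) PySem.Dict.empty).getD c []) ++ (((PySem.List.enumerate l s).filter (fun it =>
        decide (p ∈ PySem.List.pyRange 0 (PySem.List.len it.2.toList) 1 ∧ key = cutS it.2 p ∧
          c = PySem.List.pyGetD it.2.toList p ' '))).map (·.1)) := by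
  intro l
  induction l with
  | nil => intro s d; simp [PySem.List.enumerate_nil]
  | cons a rest ih =>
    intro s d
    rw [PySem.List.enumerate_cons]
    simp only [List.foldl_cons, List.filter_cons]
    rw [ih]
    rw [bucket_inner a s p key c _ (PySem.List.nodup_pyRange_one _ _)]
    by_cases hc : p ∈ PySem.List.pyRange 0 (PySem.List.len a.toList) 1 ∧ key = cutS a p ∧
        c = PySem.List.pyGetD a.toList p ' '
    · rw [if_pos hc, if_pos (decide_eq_true hc)]
      simp
    · rw [if_neg hc, if_neg (fun h => hc (of_decide_eq_true h))]

lemma mem_bucket (m : List String) (p : Int) (key : String) (c : Char) (j : Int) :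
    j ∈ ((buildBuckets m).getD (p, key) PySem.Dict.empty).getD c [] ↔
      ∃ k : Nat, k < m.length ∧ j = (k : Int) ∧
        (0 ≤ p ∧ p < (PySem.List.pyGetD m (k : Int) "").toList.length) ∧
        key = cutS (PySem.List.pyGetD m (k : Int) "") p ∧
        c = PySem.List.pyGetD (PySem.List.pyGetD m (k : Int) "").toList p ' ' := by
  unfold buildBuckets
  rw [bucket_build]
  simp only [PySem.Dict.getD_empty, List.nil_append, List.mem_map, List.mem_filter]
  constructor
  · rintro ⟨it, ⟨hmem, hcond⟩, hfst⟩
    obtain ⟨k, hk, hx, hget⟩ := (pv_mem_enumerate m 0 it.1 it.2).mp (by rwa [← Prod.mk.eta (p := it)] at hmem)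
    have hcond' := of_decide_eq_true hcond
    rw [PySem.List.mem_pyRange_one] at hcond'
    simp only [PySem.List.len_eq] at hcond'
    have hgetD : PySem.List.pyGetD m (k : Int) "" = it.2 := by
      rw [PySem.List.pyGetD_natCast, List.getD_eq_getElem _ _ hk]
      exact List.getElem?_eq_some_iff.mp hget |>.choose_spec
    refine ⟨k, hk, ?_, ?_, ?_, ?_⟩
    · omega
    · rw [hgetD]; exact ⟨hcond'.1.1, by exact_mod_cast hcond'.1.2⟩
    · rw [hgetD]; exact hcond'.2.1
    · rw [hgetD]; exact hcond'.2.2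
  · rintro ⟨k, hk, hj, ⟨hp0, hpL⟩, hkey, hchar⟩
    refine ⟨((k : Int), PySem.List.pyGetD m (k : Int) ""), ⟨?_, ?_⟩, by simp [hj]⟩
    · apply (pv_mem_enumerate m 0 _ _).mpr
      refine ⟨k, hk, by omega, ?_⟩
      rw [PySem.List.pyGetD_natCast, List.getD_eq_getElem _ _ hk, List.getElem?_eq_some_iff]
      exact ⟨hk, rfl⟩
    · apply decide_eq_true
      refine ⟨?_, hkey, hchar⟩
      rw [PySem.List.mem_pyRange_one]
      simp only [PySem.List.len_eq]
      exact ⟨hp0, by exact_mod_cast hpL⟩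

lemma pv_inner_nodup (m : List String) (p : Int) (key : String) :
    ((buildBuckets m).getD (p, key) PySem.Dict.empty).keys.Nodup := by
  suffices h : ∀ q : Int × String, ((buildBuckets m).getD q PySem.Dict.empty).keys.Nodup from h (p, key)
  unfold buildBuckets
  apply pv_foldl_pres (P := fun d : PySem.Dict (Int × String) (PySem.Dict Char (List Int)) =>
    ∀ q : Int × String, (d.getD q PySem.Dict.empty).keys.Nodup)
  · intro q
    rw [PySem.Dict.getD_empty]
    exact PySem.Dict.nodup_keys_empty
  · intro it _ d hd
    apply pv_foldl_pres (P := fun d : PySem.Dict (Int × String) (PySem.Dict Char (List Int)) =>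
      ∀ q : Int × String, (d.getD q PySem.Dict.empty).keys.Nodup) _ _ _ hd
    intro p' _ d hd q
    rw [PySem.Dict.getD_insert]
    by_cases hq : q = (p', cutS it.2 p')
    · rw [if_pos hq]
      exact PySem.Dict.nodup_keys_insert _ _ _ (hd _)
    · rw [if_neg hq]
      exact hd q

lemma pv_get?_of_mem_getD {κ ν : Type} [BEq κ] [LawfulBEq κ] (d : PySem.Dict κ (List ν)) (k : κ)
    {x : ν} (h : x ∈ d.getD k []) : d.get? k = some (d.getD k []) := by
  cases hg : d.get? k with
  | none =>
    rw [PySem.Dict.getD_eq_get?_getD, hg] at h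
    simp at h
  | some v =>
    simp [PySem.Dict.getD_eq_get?_getD, hg]

def goodL (m : List String) (i : Int) : List (Int × Int) :=
  (PySem.List.pyRange 0 (PySem.List.len (PySem.List.pyGetD m i "").toList) 1).flatMap (fun p =>
    (((buildBuckets m).getD (p, cutS (PySem.List.pyGetD m i "") p) PySem.Dict.empty).items).flatMap (fun ci =>
      if ci.1 ≠ PySem.List.pyGetD (PySem.List.pyGetD m i "").toList p ' '
      then (ci.2.filter (fun j => decide (j > i))).map (fun j => (j, p))
      else []))

lemma bPartner_eq (m : List String) (i : Int) :
    bPartner m i = (goodL m i).foldl (fun pd x => pd.insert x.1 x.2) PySem.Dict.empty := by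
  unfold bPartner goodL
  rw [pv_foldl_flatMap]
  congr 1
  funext pd p
  rw [pv_foldl_flatMap]
  congr 1
  funext pd ci
  by_cases hc : ci.1 ≠ PySem.List.pyGetD (PySem.List.pyGetD m i "").toList p ' '
  · rw [if_pos hc, if_pos hc, PySem.List.foldl_ite_eq_foldl_filter, List.foldl_map]
  · rw [if_neg hc, if_neg hc]
    rfl


lemma pv_get?_foldl_insert_of_all (l : List (Int × Int)) (j p : Int)
    (hall : ∀ q ∈ l, q.1 = j → q.2 = p) :
    ∀ (d : PySem.Dict Int Int), (d.get? j = some p ∨ (j, p) ∈ l) →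
    ((l.foldl (fun d x => d.insert x.1 x.2) d).get? j) = some p := by
  induction l with
  | nil =>
    intro d h
    rcases h with h | h
    · exact h
    · cases h
  | cons x rest ih =>
    intro d h
    simp only [List.foldl_cons]
    by_cases hx : x.1 = j
    · have hv : x.2 = p := hall x List.mem_cons_self hx
      apply ih (fun q hq => hall q (List.mem_cons_of_mem _ hq))
      left
      rw [← hx, ← hv]
      exact PySem.Dict.get?_insert_self d x.1 x.2
    · apply ih (fun q hq => hall q (List.mem_cons_of_mem _ hq))
      rcases h with h | h
      · left; rwa [PySem.Dict.get?_insert_of_ne d x.2 (fun he => hx he.symm)]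
      · rcases List.mem_cons.mp h with he | hm
        · exact absurd (congrArg Prod.fst he.symm) hx
        · right; exact hm

lemma pv_mem_keys_foldl_insert (l : List (Int × Int)) (j : Int) :
    ∀ (d : PySem.Dict Int Int), j ∈ (l.foldl (fun d x => d.insert x.1 x.2) d).keys ↔
      j ∈ d.keys ∨ ∃ p, (j, p) ∈ l := by
  induction l with
  | nil => intro d; simp
  | cons x rest ih =>
    intro d
    simp only [List.foldl_cons, ih, PySem.Dict.mem_keys_insert]
    constructor
    · rintro ((he | hd) | ⟨p, hp⟩)
      · exact Or.inr ⟨x.2, by simp [he]⟩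
      · exact Or.inl hd
      · exact Or.inr ⟨p, List.mem_cons_of_mem _ hp⟩
    · rintro (hd | ⟨p, hp⟩)
      · exact Or.inl (Or.inr hd)
      · rcases List.mem_cons.mp hp with he | hm
        · exact Or.inl (Or.inl (congrArg Prod.fst he.symm ▸ rfl))
        · exact Or.inr ⟨p, hm⟩

/-! Per-index characterisation (under Pre_). -/

lemma pv_get_mem (m : List String) {k : Nat} (hk : k < m.length) :
    PySem.List.pyGetD m (k : Int) "" ∈ m := by
  rw [PySem.List.pyGetD_natCast, List.getD_eq_getElem _ _ hk]
  exact List.getElem_mem hk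

lemma pv_len_eq (m : List String) (hpre : Pre_reduce_minterms m) {a b : Nat}
    (ha : a < m.length) (hb : b < m.length) :
    (PySem.List.pyGetD m (a : Int) "").toList.length = (PySem.List.pyGetD m (b : Int) "").toList.length :=
  hpre _ (pv_get_mem m ha) _ (pv_get_mem m hb)

lemma cutS_eq_cutS_iff (m : List String) (hpre : Pre_reduce_minterms m) {a b pN : Nat}
    (ha : a < m.length) (hb : b < m.length)
    (hp : pN < (PySem.List.pyGetD m (a : Int) "").toList.length) :
    cutS (PySem.List.pyGetD m (a : Int) "") (pN : Int) = cutS (PySem.List.pyGetD m (b : Int) "") (pN : Int) ↔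
      ∀ q, q < (PySem.List.pyGetD m (a : Int) "").toList.length → q ≠ pN →
        (PySem.List.pyGetD m (a : Int) "").toList.getD q ' ' = (PySem.List.pyGetD m (b : Int) "").toList.getD q ' ' := by
  rw [cutS_natCast, cutS_natCast]
  rw [← cutL_eq_iff _ _ (pv_len_eq m hpre ha hb) pN hp]
  constructor
  · exact pv_ofList_inj
  · intro h; rw [h]

lemma mem_goodL_iff (m : List String) (hpre : Pre_reduce_minterms m) (iN : Nat) (hiN : iN < m.length)
    (xj xp : Int) :
    (xj, xp) ∈ goodL m (iN : Int) ↔ ∃ jN pN : Nat, xj = (jN : Int) ∧ xp = (pN : Int) ∧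
      jN < m.length ∧ iN < jN ∧
      OneAt (PySem.List.pyGetD m (iN : Int) "").toList (PySem.List.pyGetD m (jN : Int) "").toList pN := by
  unfold goodL
  rw [List.mem_flatMap]
  constructor
  · rintro ⟨p, hp, hx⟩
    rw [List.mem_flatMap] at hx
    obtain ⟨ci, hci, hx2⟩ := hx
    by_cases hcne : ci.1 ≠ PySem.List.pyGetD (PySem.List.pyGetD m (iN : Int) "").toList p ' '
    · rw [if_pos hcne] at hx2
      rw [List.mem_map] at hx2
      obtain ⟨j0, hj0, hje⟩ := hx2
      obtain ⟨hj0mem, hj0gt⟩ := List.mem_filter.mp hj0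
      have hxj : xj = j0 := (congrArg Prod.fst hje).symm
      have hxp : xp = p := (congrArg Prod.snd hje).symm
      subst hxj
      subst hxp
      have hnd := pv_inner_nodup m xp (cutS (PySem.List.pyGetD m (iN : Int) "") xp)
      have hgd : ((buildBuckets m).getD (xp, cutS (PySem.List.pyGetD m (iN : Int) "") xp)
          PySem.Dict.empty).getD ci.1 [] = ci.2 :=
        PySem.Dict.getD_of_mem_items _ (by rwa [← Prod.mk.eta (p := ci)] at hci) hnd []
      have hmemb : xj ∈ ((buildBuckets m).getD (xp, cutS (PySem.List.pyGetD m (iN : Int) "") xp)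
          PySem.Dict.empty).getD ci.1 [] := by rw [hgd]; exact hj0mem
      obtain ⟨jN, hjN, hj1, hpd, hkey, hchar⟩ := (mem_bucket m _ _ _ _).mp hmemb
      rw [PySem.List.mem_pyRange_one] at hp
      rw [PySem.List.len_eq] at hp
      obtain ⟨pN, rfl⟩ : ∃ pN : Nat, xp = (pN : Int) := ⟨xp.toNat, by omega⟩
      subst hj1
      have hr2 : ((pN : Nat) : Int) < ((PySem.List.pyGetD m (iN : Int) "").toList.length : Int) := hp.2
      have hpL : pN < (PySem.List.pyGetD m (iN : Int) "").toList.length := by exact_mod_cast hr2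
      have hgt : iN < jN := by
        have h := of_decide_eq_true hj0gt
        exact_mod_cast h
      refine ⟨jN, pN, rfl, rfl, hjN, hgt, hpL, ?_, ?_⟩
      · rw [hchar] at hcne
        rw [PySem.List.pyGetD_natCast (PySem.List.pyGetD m ((jN : Nat) : Int) "").toList pN ' ',
            PySem.List.pyGetD_natCast (PySem.List.pyGetD m ((iN : Nat) : Int) "").toList pN ' '] at hcne
        exact fun he => hcne he.symm
      · exact (cutS_eq_cutS_iff m hpre hiN hjN hpL).mp hkey
    · rw [if_neg hcne] at hx2
      simp at hx2
  · rintro ⟨jN, pN, rfl, rfl, hjN, hij, hone⟩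
    have hlen := pv_len_eq m hpre hiN hjN
    have hb1 : ((pN : Nat) : Int) ∈ PySem.List.pyRange 0 (PySem.List.len (PySem.List.pyGetD m (iN : Int) "").toList) 1 := by
      rw [PySem.List.mem_pyRange_one, PySem.List.len_eq]
      exact ⟨by omega, by exact_mod_cast hone.1⟩
    have hb2 : ((jN : Nat) : Int) ∈ ((buildBuckets m).getD (((pN : Nat) : Int),
        cutS (PySem.List.pyGetD m (iN : Int) "") ((pN : Nat) : Int)) PySem.Dict.empty).getD
        (PySem.List.pyGetD (PySem.List.pyGetD m ((jN : Nat) : Int) "").toList ((pN : Nat) : Int) ' ') [] := by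
      apply (mem_bucket m _ _ _ _).mpr
      refine ⟨jN, hjN, rfl, ⟨by omega, ?_⟩, ?_, rfl⟩
      · rw [← hlen]; exact_mod_cast hone.1
      · exact (cutS_eq_cutS_iff m hpre hiN hjN hone.1).mpr hone.2.2
    have hb3 : ((jN : Nat) : Int) > ((iN : Nat) : Int) := by exact_mod_cast hij
    have hb4 : PySem.List.pyGetD (PySem.List.pyGetD m ((jN : Nat) : Int) "").toList ((pN : Nat) : Int) ' '
        ≠ PySem.List.pyGetD (PySem.List.pyGetD m ((iN : Nat) : Int) "").toList ((pN : Nat) : Int) ' ' := by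
      rw [PySem.List.pyGetD_natCast (PySem.List.pyGetD m ((jN : Nat) : Int) "").toList pN ' ',
          PySem.List.pyGetD_natCast (PySem.List.pyGetD m ((iN : Nat) : Int) "").toList pN ' ']
      exact fun he => hone.2.1 he.symm
    refine ⟨((pN : Nat) : Int), hb1, ?_⟩
    rw [List.mem_flatMap]
    have hget := pv_get?_of_mem_getD _ _ hb2
    have hitems := PySem.Dict.mem_items_of_get?_eq_some _ hget
    refine ⟨_, hitems, ?_⟩
    rw [if_pos hb4]
    rw [List.mem_map]
    exact ⟨(jN : Int), List.mem_filter.mpr ⟨hb2, decide_eq_true hb3⟩, rfl⟩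


def targetL (m : List String) (i : Int) : List Int :=
  (PySem.List.pyRange i (PySem.List.len m) 1).filter
    (fun j => find_diff (PySem.List.pyGetD m i "") (PySem.List.pyGetD m j ""))

lemma mem_targetL (m : List String) (_hpre : Pre_reduce_minterms m) (iN : Nat) (_hiN : iN < m.length)
    (j : Int) :
    j ∈ targetL m (iN : Int) ↔ ∃ jN pN : Nat, j = (jN : Int) ∧ jN < m.length ∧ iN < jN ∧
      OneAt (PySem.List.pyGetD m (iN : Int) "").toList (PySem.List.pyGetD m (jN : Int) "").toList pN := by
  unfold targetL
  rw [List.mem_filter, PySem.List.mem_pyRange_one]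
  rw [PySem.List.len_eq]
  constructor
  · rintro ⟨⟨hij, hjn⟩, hfd⟩
    obtain ⟨jN, rfl⟩ : ∃ jN : Nat, j = (jN : Int) := ⟨j.toNat, by omega⟩
    obtain ⟨pN, hone⟩ := (find_diff_iff _ _).mp hfd
    have hne : iN ≠ jN := by
      intro he
      subst he
      rw [find_diff_self] at hfd
      cases hfd
    refine ⟨jN, pN, rfl, by exact_mod_cast hjn, ?_, hone⟩
    have : iN ≤ jN := by exact_mod_cast hij
    omega
  · rintro ⟨jN, pN, rfl, hjN, hij, hone⟩
    refine ⟨⟨by exact_mod_cast Nat.le_of_lt hij, by exact_mod_cast hjN⟩, ?_⟩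
    exact (find_diff_iff _ _).mpr ⟨pN, hone⟩

lemma mem_keys_bPartner (m : List String) (hpre : Pre_reduce_minterms m) (iN : Nat)
    (hiN : iN < m.length) (j : Int) :
    j ∈ (bPartner m (iN : Int)).keys ↔ j ∈ targetL m (iN : Int) := by
  rw [bPartner_eq, pv_mem_keys_foldl_insert, mem_targetL m hpre iN hiN]
  simp only [PySem.Dict.keys_empty, List.not_mem_nil, false_or]
  constructor
  · rintro ⟨p, hp⟩
    obtain ⟨jN, pN, hx1, hx2, hjN, hij, hone⟩ := (mem_goodL_iff m hpre iN hiN j p).mp hp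
    exact ⟨jN, pN, hx1, hjN, hij, hone⟩
  · rintro ⟨jN, pN, hj, hjN, hij, hone⟩
    exact ⟨(pN : Int), (mem_goodL_iff m hpre iN hiN j _).mpr ⟨jN, pN, hj, rfl, hjN, hij, hone⟩⟩

lemma getD_bPartner (m : List String) (hpre : Pre_reduce_minterms m) (iN : Nat) (hiN : iN < m.length)
    {jN pN : Nat} (hjN : jN < m.length) (hij : iN < jN)
    (hone : OneAt (PySem.List.pyGetD m (iN : Int) "").toList (PySem.List.pyGetD m (jN : Int) "").toList pN) :
    (bPartner m (iN : Int)).getD (jN : Int) 0 = (pN : Int) := by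
  rw [bPartner_eq]
  have hget : ((goodL m (iN : Int)).foldl (fun pd x => pd.insert x.1 x.2) PySem.Dict.empty).get? (jN : Int) = some (pN : Int) := by
    apply pv_get?_foldl_insert_of_all
    · intro q hq hq1
      obtain ⟨qj, qp⟩ := q
      obtain ⟨jN', pN', hx1, hx2, hjN', hij', hone'⟩ := (mem_goodL_iff m hpre iN hiN qj qp).mp hq
      simp only at hq1
      subst hq1
      have h2 : jN = jN' := by exact_mod_cast hx1
      subst h2
      have h3 := oneAt_unique hone' hone
      subst h3
      exact hx2
    · right
      exact (mem_goodL_iff m hpre iN hiN _ _).mpr ⟨jN, pN, rfl, rfl, hjN, hij, hone⟩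
  rw [PySem.Dict.getD_eq_get?_getD, hget]
  rfl

set_option maxHeartbeats 1000000 in
lemma sortedKeys_eq (m : List String) (hpre : Pre_reduce_minterms m) (iN : Nat) (hiN : iN < m.length) :
    PySem.List.sorted (bPartner m (iN : Int)).keys (fun j => j) false = targetL m (iN : Int) := by
  refine PySem.List.sorted_eq_of_perm_of_pairwise_lt ((bPartner m (iN : Int)).keys)
    (targetL m (iN : Int)) (fun j => j) ?_ ?_
  · have hnd1 : (targetL m (iN : Int)).Nodup := by
      apply List.Pairwise.imp (fun {a b} h => ne_of_lt h)
      exact (PySem.List.pairwise_lt_pyRange_one _ _).filter _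
    have hnd2 : (bPartner m (iN : Int)).keys.Nodup := by
      rw [bPartner_eq]
      exact PySem.Dict.nodup_keys_foldl_insert_key (goodL m (iN : Int)) (fun x : Int × Int => x.1)
        (fun _ x => x.2) PySem.Dict.empty PySem.Dict.nodup_keys_empty
    rw [List.perm_ext_iff_of_nodup hnd1 hnd2]
    intro a
    exact (mem_keys_bPartner m hpre iN hiN a).symm
  · exact (PySem.List.pairwise_lt_pyRange_one _ _).filter _

/-! Checked-array relation. -/

lemma pv_map_set_true (l : List Bool) (k : Nat) :
    (l.set k true).map pvConv = (l.map pvConv).set k (some 1) := by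
  rw [List.map_set]
  rfl

/-! The phase-1 inner loop preserves the relation. -/

set_option maxHeartbeats 1000000 in
lemma inner_rel (m : List String) (hpre : Pre_reduce_minterms m) (i : Int)
    (hi : i ∈ PySem.List.pyRange 0 (PySem.List.len m) 1)
    (sa : List String × List (Option Int)) (sb : List String × List Bool)
    (h1 : sa.1 = sb.1) (h2 : sa.2 = sb.2.map pvConv) (h3 : sb.2.length = m.length) :
    (aOuter m sa i).1 = (bInner m sb i).1 ∧ (aOuter m sa i).2 = (bInner m sb i).2.map pvConv ∧
      (bInner m sb i).2.length = m.length := by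
  rw [PySem.List.mem_pyRange_one] at hi
  rw [PySem.List.len_eq] at hi
  obtain ⟨iN, rfl⟩ : ∃ iN : Nat, i = (iN : Int) := ⟨i.toNat, by omega⟩
  have hiN : iN < m.length := by exact_mod_cast hi.2
  unfold aOuter bInner
  rw [sortedKeys_eq m hpre iN hiN]
  have hA : List.foldl (aInner m (iN : Int)) sa (PySem.List.pyRange (iN : Int) (PySem.List.len m) 1)
      = List.foldl (aCore m (iN : Int)) sa (targetL m (iN : Int)) := by
    have hptw := PySem.List.foldl_congr_mem (PySem.List.pyRange (iN : Int) (PySem.List.len m) 1)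
      (aInner m (iN : Int))
      (fun st j => if find_diff (PySem.List.pyGetD m (iN : Int) "") (PySem.List.pyGetD m j "") = true
        then aCore m (iN : Int) st j else st) sa
      (fun acc j _ => rfl)
    rw [hptw, PySem.List.foldl_if_eq_foldl_filter]
    rfl
  rw [hA]
  refine pv_foldl_rel (fun (x : List String × List (Option Int)) (y : List String × List Bool) =>
      x.1 = y.1 ∧ x.2 = y.2.map pvConv ∧ y.2.length = m.length) (targetL m (iN : Int))
      (aCore m (iN : Int)) _ sa sb ⟨h1, h2, h3⟩ ?_
  intro j hj x y hxy
  obtain ⟨g1, g2, g3⟩ := hxy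
  obtain ⟨jN, pN, rfl, hjN, hij, hone⟩ := (mem_targetL m hpre iN hiN j).mp hj
  have hgetD : (bPartner m (iN : Int)).getD (jN : Int) 0 = (pN : Int) :=
    getD_bPartner m hpre iN hiN hjN hij hone
  have hcomb : String.ofList (PySem.List.slice (PySem.List.pyGetD m (iN : Int) "").toList none (some ((pN : Nat) : Int)) ++
      '-' :: PySem.List.slice (PySem.List.pyGetD m (iN : Int) "").toList (some (((pN : Nat) : Int) + 1)) none)
      = replace_complements (PySem.List.pyGetD m (iN : Int) "") (PySem.List.pyGetD m (jN : Int) "") := by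
    have hcast : (((pN : Nat) : Int) + 1) = ((pN + 1 : Nat) : Int) := by push_cast; ring
    rw [hcast, PySem.List.slice_to_natCast, PySem.List.slice_from_natCast]
    rw [replace_complements_eq _ _ pN hone]
  have hchecked : PySem.List.pySetD (PySem.List.pySetD x.2 (iN : Int) (some 1)) (jN : Int) (some 1)
      = (PySem.List.pySetD (PySem.List.pySetD y.2 (iN : Int) true) (jN : Int) true).map pvConv := by
    rw [g2]
    simp only [PySem.List.pySetD_natCast]
    rw [pv_map_set_true, pv_map_set_true]
  have hlen : (PySem.List.pySetD (PySem.List.pySetD y.2 (iN : Int) true) (jN : Int) true).length = m.length := by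
    simp only [PySem.List.pySetD_natCast]
    simp [g3]
  simp only [aCore, hgetD, hcomb]
  rw [g1, in_vector_eq_contains]
  cases hc : y.1.contains (replace_complements (PySem.List.pyGetD m (iN : Int) "") (PySem.List.pyGetD m (jN : Int) "")) with
  | false =>
    rw [if_pos (rfl : (false : Bool) = false), if_neg (by simp : ¬ ((false : Bool) = true))]
    exact ⟨rfl, hchecked, hlen⟩
  | true =>
    rw [if_neg (by simp : ¬ ((true : Bool) = false)), if_pos (rfl : (true : Bool) = true)]
    exact ⟨rfl, hchecked, hlen⟩

/-! Main equivalence. -/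

set_option maxHeartbeats 1000000 in
lemma main_eq (m : List String) (hpre : Pre_reduce_minterms m) :
    reduce_minterms m = reduce_minterms_alt m := by
  rw [reduce_eq, alt_eq]
  have hrel : (aPh1 m).1 = (bPh1 m).1 ∧ (aPh1 m).2 = (bPh1 m).2.map pvConv ∧
      (bPh1 m).2.length = m.length := by
    unfold aPh1 bPh1
    refine pv_foldl_rel (fun (x : List String × List (Option Int)) (y : List String × List Bool) =>
        x.1 = y.1 ∧ x.2 = y.2.map pvConv ∧ y.2.length = m.length) _ (aOuter m) (bInner m) _ _
        ⟨rfl, by simp [pvConv], by simp⟩ ?_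
    intro i hi x y hxy
    exact inner_rel m hpre i hi x y hxy.1 hxy.2.1 hxy.2.2
  unfold phase2A phase2B
  rw [hrel.1]
  apply PySem.List.foldl_congr_mem
  intro acc i hi
  rw [PySem.List.mem_pyRange_one] at hi
  rw [PySem.List.len_eq] at hi
  obtain ⟨iN, rfl⟩ : ∃ iN : Nat, i = (iN : Int) := ⟨i.toNat, by omega⟩
  have hiN : iN < m.length := by exact_mod_cast hi.2
  have hcheck : PySem.List.pyGetD (aPh1 m).2 (iN : Int) none
      = pvConv (PySem.List.pyGetD (bPh1 m).2 (iN : Int) false) := by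
    rw [hrel.2.1]
    simp only [PySem.List.pyGetD_natCast]
    rw [List.getD_eq_getElem _ _ (by rw [List.length_map, hrel.2.2]; exact hiN),
        List.getD_eq_getElem _ _ (by rw [hrel.2.2]; exact hiN), List.getElem_map]
  rw [hcheck, in_vector_eq_contains]
  cases hb : PySem.List.pyGetD (bPh1 m).2 (iN : Int) false with
  | false => simp [pvConv]
  | true => simp [pvConv]

-- ===== VERDICT (by name: the statement is the Claim_ definition above) =====
theorem reduce_minterms_spec : Claim_equal_reduce_minterms := by
  intro m _ hpre
  exact main_eq m hpre
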